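-- pv_equiv track=rewrite | github.com/HibernalGlow/MineruCustom | src/tool/footnotes2mineru.py | convert_to_quote_format
-- ===== SOURCE A (Python) =====
-- def convert_to_quote_format(markdown_text):
--     """将脚注代码块转换为引述格式，保持page块不变"""
--     lines = markdown_text.split('\n')
--     result_lines = []
--     in_block = False
--     block_type = None
--     last_was_footnote = False
--
--     for i, line in enumerate(lines):
--         if line.strip() in ['```footnote', '```page']:
--             block_type = 'footnote' if line.strip() == '```footnote' else 'page'
--             in_block = True
--             if block_type == 'footnote':
--                 # 如果上一个是脚注块，确保有两个空行分隔
--                 if last_was_footnote and result_lines and result_lines[-1].strip():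
--                     result_lines.extend([''])
--                 result_lines.append('> ---')
--                 result_lines.append('>')
--             else:
--                 result_lines.append(line)
--         elif line.strip() == '```' and in_block:
--             if block_type == 'page':
--                 result_lines.append(line)
--             else:
--                 # 脚注块结束后添加两个空行
--                 result_lines.extend([''])
--             in_block = False
--             last_was_footnote = (block_type == 'footnote')
--             block_type = None
--         elif in_block:
--             if line.strip():
--                 if block_type == 'footnote':
--                     result_lines.append('> * ' + line.strip())
--                 else:
--                     result_lines.append(line)
--         else:
--             result_lines.append(line)
--
--     # 移除末尾多余的空行
--     while result_lines and not result_lines[-1].strip():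
--         result_lines.pop()
--
--     return '\n'.join(result_lines)
-- ===== SOURCE B (Python) =====
-- def _parse(lines):
--     """First pass: split the lines into typed segments.
--     ('plain', lines) / ('footnote', body, closed) / ('page', fence, body, close_line or None)."""
--     segs = []
--     cur = ('plain', [])
--     for line in lines:
--         s = line.strip()
--         if s in ('```footnote', '```page'):
--             segs.append(cur)
--             cur = ('footnote', [], False) if s == '```footnote' else ('page', line, [], None)
--         elif s == '```' and cur[0] != 'plain':
--             if cur[0] == 'footnote':
--                 segs.append(('footnote', cur[1], True))
--             else:
--                 segs.append(('page', cur[1], cur[2], line))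
--             cur = ('plain', [])
--         elif cur[0] == 'plain':
--             cur[1].append(line)
--         elif cur[0] == 'footnote':
--             cur[1].append(line)
--         else:
--             cur[2].append(line)
--     segs.append(cur)
--     return segs
--
-- def convert_to_quote_format(markdown_text):
--     """将脚注代码块转换为引述格式，保持page块不变"""
--     out = []
--     prev_footnote = False
--     for seg in _parse(markdown_text.split('\n')):
--         if seg[0] == 'plain':
--             out.extend(seg[1])
--         elif seg[0] == 'footnote':
--             _, body, closed = seg
--             if prev_footnote and out and out[-1].strip():
--                 out.append('')
--             out.append('> ---')
--             out.append('>')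
--             out.extend('> * ' + l.strip() for l in body if l.strip())
--             if closed:
--                 out.append('')
--                 prev_footnote = True
--         else:
--             _, fence, body, close = seg
--             out.append(fence)
--             out.extend(l for l in body if l.strip())
--             if close is not None:
--                 out.append(close)
--                 prev_footnote = False
--     n = len(out)
--     while n > 0 and not out[n - 1].strip():
--         n -= 1
--     return '\n'.join(out[:n])
-- ===== Notes on version B (the rewrite author's own statement) =====
-- stated objective: alternative
-- what changed: Replaces A's single four-variable state machine that interleaves parsing and output with a two-pass pipeline: first tokenize the lines into typed segments (plain run / footnote block / page block, with an open/closed flag), then render the segments, threading only a prev-footnote flag.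
import Mathlib
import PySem

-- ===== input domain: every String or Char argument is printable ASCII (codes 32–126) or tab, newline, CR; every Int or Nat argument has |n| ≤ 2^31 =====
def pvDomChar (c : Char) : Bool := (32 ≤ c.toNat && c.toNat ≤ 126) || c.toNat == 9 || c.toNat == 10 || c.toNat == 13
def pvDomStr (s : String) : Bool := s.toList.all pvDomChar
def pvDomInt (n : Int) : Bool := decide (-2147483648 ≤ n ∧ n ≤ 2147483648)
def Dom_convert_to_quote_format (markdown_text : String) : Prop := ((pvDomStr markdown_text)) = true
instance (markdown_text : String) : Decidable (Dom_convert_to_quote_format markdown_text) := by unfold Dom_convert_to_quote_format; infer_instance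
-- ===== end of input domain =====

-- B re-implements A's single state machine as a two-pass pipeline (parse into typed segments, then render); same return value, alternative decomposition.

-- ===== PORT A =====
inductive BType | footnote | page
deriving DecidableEq, Repr

-- A's single state-machine loop: (lines, result_lines, in_block, block_type, last_was_footnote)
def aLoop : List String → List String → Bool → Option BType → Bool → List String
  | [], res, _, _, _ => res
  | line :: rest, res, inb, bt, lwf =>
    let s := PySem.Str.strip line
    if s == "```footnote" || s == "```page" then
      let bt' := if s == "```footnote" then BType.footnote else BType.page
      if bt' == BType.footnote then
        let res' := if lwf && (match res.getLast? with
                               | some x => PySem.Str.strip x != ""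
                               | none => false) then res ++ [""] else res
        aLoop rest (res' ++ ["> ---", ">"]) true (some bt') lwf
      else
        aLoop rest (res ++ [line]) true (some bt') lwf
    else if s == "```" && inb then
      let res' := if bt == some BType.page then res ++ [line] else res ++ [""]
      aLoop rest res' false none (bt == some BType.footnote)
    else if inb then
      if PySem.Str.strip line != "" then
        if bt == some BType.footnote then aLoop rest (res ++ ["> * " ++ PySem.Str.strip line]) inb bt lwf
        else aLoop rest (res ++ [line]) inb bt lwf
      else aLoop rest res inb bt lwf
    else
      aLoop rest (res ++ [line]) inb bt lwf

-- A's trailing-blank removal: while result_lines and not result_lines[-1].strip(): pop()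
def trimA (res : List String) : List String :=
  if (match res.getLast? with
      | some x => PySem.Str.strip x == ""
      | none => false) then trimA res.dropLast else res
termination_by res.length
decreasing_by
  cases res with
  | nil => simp_all
  | cons a t => simp

-- markdown_text.split('\n'): sep ≠ "" so split? is always `some`
def convert_to_quote_format (markdown_text : String) : String :=
  PySem.Str.join "\n" (trimA (aLoop ((PySem.Str.split? markdown_text "\n").getD []) [] false none false))

-- ===== PORT B =====
-- B, pass 1: split the lines into typed segments (plain run / footnote block / page block).
inductive PState
  | plain (acc : List String)
  | foot (body : List String)
  | page (fence : String) (body : List String)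
deriving Repr

inductive Seg
  | plain (ls : List String)
  | foot (body : List String) (closed : Bool)
  | page (fence : String) (body : List String) (close : Option String)
deriving Repr

-- segs.append(cur) when a fence interrupts the current segment or at EOF
def finishSeg : PState → Seg
  | .plain acc => .plain acc
  | .foot body => .foot body false
  | .page f body => .page f body none

def parseAux : List String → PState → List Seg
  | [], st => [finishSeg st]
  | line :: rest, st =>
    let s := PySem.Str.strip line
    if s == "```footnote" then finishSeg st :: parseAux rest (.foot [])
    else if s == "```page" then finishSeg st :: parseAux rest (.page line [])
    else
      match st with
      | .plain acc =>
        parseAux rest (.plain (acc ++ [line]))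
      | .foot body =>
        if s == "```" then Seg.foot body true :: parseAux rest (.plain [])
        else parseAux rest (.foot (body ++ [line]))
      | .page f body =>
        if s == "```" then Seg.page f body (some line) :: parseAux rest (.plain [])
        else parseAux rest (.page f (body ++ [line]))

-- '> * ' + l.strip() for l in body if l.strip()
def fmap (body : List String) : List String :=
  body.filterMap (fun l => if PySem.Str.strip l != "" then some ("> * " ++ PySem.Str.strip l) else none)

-- l for l in body if l.strip()
def pfilter (body : List String) : List String :=
  body.filter (fun l => PySem.Str.strip l != "")

-- B, pass 2: render the segments, threading (out, prev_footnote)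
def render : List Seg → List String → Bool → List String
  | [], out, _ => out
  | .plain p :: ss, out, pf => render ss (out ++ p) pf
  | .foot body closed :: ss, out, pf =>
    let out0 := if pf && (match out.getLast? with
                          | some x => PySem.Str.strip x != ""
                          | none => false) then out ++ [""] else out
    let out1 := out0 ++ ["> ---", ">"] ++ fmap body
    if closed then render ss (out1 ++ [""]) true else render ss out1 pf
  | .page f body close :: ss, out, pf =>
    let out1 := out ++ [f] ++ pfilter body
    match close with
    | some c => render ss (out1 ++ [c]) false
    | none => render ss out1 pf

-- B's trailing-blank removal: shrink n while out[n-1] is blank, then out[:n]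
def trimN (out : List String) : Nat → Nat
  | 0 => 0
  | n + 1 => if PySem.Str.strip (out.getD n "") == "" then trimN out n else n + 1

def convert_to_quote_format_alt (markdown_text : String) : String :=
  let out := render (parseAux ((PySem.Str.split? markdown_text "\n").getD []) (.plain [])) [] false
  PySem.Str.join "\n" (out.take (trimN out out.length))

-- ===== PRECONDITION & SPEC =====
def Spec_convert_to_quote_format (markdown_text : String) (out : String) : Prop := out = convert_to_quote_format_alt markdown_text
instance (markdown_text : String) (out : String) : Decidable (Spec_convert_to_quote_format markdown_text out) := by unfold Spec_convert_to_quote_format; infer_instance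

-- ===== CLAIM (what is proved, stated in full; the proofs are below) =====
def Claim_equal_convert_to_quote_format : Prop := ∀ (markdown_text : String), Dom_convert_to_quote_format markdown_text → Spec_convert_to_quote_format markdown_text (convert_to_quote_format markdown_text)

-- ===== LEMMAS AND PROOFS =====

-- one-step unfoldings of A's loop
lemma aLoop_foot_fence (l : String) (rest : List String) (res : List String) (pf : Bool)
    (hf : (PySem.Str.strip l == "```footnote") = true) (inb : Bool) (bt : Option BType) :
    aLoop (l :: rest) res inb bt pf
      = aLoop rest ((if pf && (match res.getLast? with
          | some x => PySem.Str.strip x != ""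
          | none => false) then res ++ [""] else res) ++ ["> ---", ">"]) true (some .footnote) pf := by
  simp [aLoop, hf]

lemma aLoop_page_fence (l : String) (rest : List String) (res : List String) (pf : Bool)
    (hf : ¬ (PySem.Str.strip l == "```footnote") = true)
    (hp : (PySem.Str.strip l == "```page") = true) (inb : Bool) (bt : Option BType) :
    aLoop (l :: rest) res inb bt pf = aLoop rest (res ++ [l]) true (some .page) pf := by
  simp [aLoop, hf, hp]

lemma aLoop_close_foot (l : String) (rest : List String) (res : List String) (pf : Bool)
    (hf : ¬ (PySem.Str.strip l == "```footnote") = true)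
    (hp : ¬ (PySem.Str.strip l == "```page") = true)
    (hc : (PySem.Str.strip l == "```") = true) :
    aLoop (l :: rest) res true (some .footnote) pf = aLoop rest (res ++ [""]) false none true := by
  simp [aLoop, hf, hp, hc]

lemma aLoop_close_page (l : String) (rest : List String) (res : List String) (pf : Bool)
    (hf : ¬ (PySem.Str.strip l == "```footnote") = true)
    (hp : ¬ (PySem.Str.strip l == "```page") = true)
    (hc : (PySem.Str.strip l == "```") = true) :
    aLoop (l :: rest) res true (some .page) pf = aLoop rest (res ++ [l]) false none false := by
  simp [aLoop, hf, hp, hc]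
  rfl

lemma aLoop_body_foot (l : String) (rest : List String) (res : List String) (pf : Bool)
    (hf : ¬ (PySem.Str.strip l == "```footnote") = true)
    (hp : ¬ (PySem.Str.strip l == "```page") = true)
    (hc : ¬ (PySem.Str.strip l == "```") = true) :
    aLoop (l :: rest) res true (some .footnote) pf
      = aLoop rest (res ++ fmap [l]) true (some .footnote) pf := by
  by_cases hs : PySem.Str.strip l = "" <;> simp [aLoop, fmap, hf, hp, hc, hs]

lemma aLoop_body_page (l : String) (rest : List String) (res : List String) (pf : Bool)
    (hf : ¬ (PySem.Str.strip l == "```footnote") = true)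
    (hp : ¬ (PySem.Str.strip l == "```page") = true)
    (hc : ¬ (PySem.Str.strip l == "```") = true) :
    aLoop (l :: rest) res true (some .page) pf
      = aLoop rest (res ++ pfilter [l]) true (some .page) pf := by
  by_cases hs : PySem.Str.strip l = "" <;> simp [aLoop, pfilter, hf, hp, hc, hs]

lemma aLoop_plain (l : String) (rest : List String) (res : List String) (pf : Bool)
    (hf : ¬ (PySem.Str.strip l == "```footnote") = true)
    (hp : ¬ (PySem.Str.strip l == "```page") = true) :
    aLoop (l :: rest) res false none pf = aLoop rest (res ++ [l]) false none pf := by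
  simp [aLoop, hf, hp]

-- one-step unfoldings of B's parser
lemma parse_fence_foot (l : String) (rest : List String) (st : PState)
    (hf : (PySem.Str.strip l == "```footnote") = true) :
    parseAux (l :: rest) st = finishSeg st :: parseAux rest (.foot []) := by
  simp [parseAux, hf]

lemma parse_fence_page (l : String) (rest : List String) (st : PState)
    (hf : ¬ (PySem.Str.strip l == "```footnote") = true)
    (hp : (PySem.Str.strip l == "```page") = true) :
    parseAux (l :: rest) st = finishSeg st :: parseAux rest (.page l []) := by
  simp [parseAux, hf, hp]

lemma parse_plain (l : String) (rest : List String) (acc : List String)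
    (hf : ¬ (PySem.Str.strip l == "```footnote") = true)
    (hp : ¬ (PySem.Str.strip l == "```page") = true) :
    parseAux (l :: rest) (.plain acc) = parseAux rest (.plain (acc ++ [l])) := by
  simp [parseAux, hf, hp]

lemma parse_foot_close (l : String) (rest : List String) (b : List String)
    (hf : ¬ (PySem.Str.strip l == "```footnote") = true)
    (hp : ¬ (PySem.Str.strip l == "```page") = true)
    (hc : (PySem.Str.strip l == "```") = true) :
    parseAux (l :: rest) (.foot b) = Seg.foot b true :: parseAux rest (.plain []) := by
  simp [parseAux, hf, hp, hc]

lemma parse_foot_body (l : String) (rest : List String) (b : List String)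
    (hf : ¬ (PySem.Str.strip l == "```footnote") = true)
    (hp : ¬ (PySem.Str.strip l == "```page") = true)
    (hc : ¬ (PySem.Str.strip l == "```") = true) :
    parseAux (l :: rest) (.foot b) = parseAux rest (.foot (b ++ [l])) := by
  simp [parseAux, hf, hp, hc]

lemma parse_page_close (l : String) (rest : List String) (f : String) (b : List String)
    (hf : ¬ (PySem.Str.strip l == "```footnote") = true)
    (hp : ¬ (PySem.Str.strip l == "```page") = true)
    (hc : (PySem.Str.strip l == "```") = true) :
    parseAux (l :: rest) (.page f b) = Seg.page f b (some l) :: parseAux rest (.plain []) := by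
  simp [parseAux, hf, hp, hc]

lemma parse_page_body (l : String) (rest : List String) (f : String) (b : List String)
    (hf : ¬ (PySem.Str.strip l == "```footnote") = true)
    (hp : ¬ (PySem.Str.strip l == "```page") = true)
    (hc : ¬ (PySem.Str.strip l == "```") = true) :
    parseAux (l :: rest) (.page f b) = parseAux rest (.page f (b ++ [l])) := by
  simp [parseAux, hf, hp, hc]

-- continuation renderers: render the rest of a block whose opening has already been emitted
def renderF : List Seg → List String → Bool → List String
  | .foot body closed :: ss, out, pf =>
    if closed then render ss (out ++ fmap body ++ [""]) true else render ss (out ++ fmap body) pf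
  | ss, out, pf => render ss out pf

def renderG : List Seg → List String → Bool → List String
  | .page _ body close :: ss, out, pf =>
    (match close with
     | some c => render ss (out ++ pfilter body ++ [c]) false
     | none => render ss (out ++ pfilter body) pf)
  | ss, out, pf => render ss out pf

lemma fmap_nil : fmap [] = [] := rfl
lemma pfilter_nil : pfilter [] = [] := rfl

lemma fmap_append (a b : List String) : fmap (a ++ b) = fmap a ++ fmap b := by
  simp [fmap]

lemma pfilter_append (a b : List String) : pfilter (a ++ b) = pfilter a ++ pfilter b := by
  simp [pfilter]

lemma render_plain_cons (p : List String) (ss : List Seg) (out : List String) (pf : Bool) :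
    render (.plain p :: ss) out pf = render ss (out ++ p) pf := rfl

lemma renderF_cons_false (b : List String) (ss : List Seg) (out : List String) (pf : Bool) :
    renderF (.foot b false :: ss) out pf = render ss (out ++ fmap b) pf := by
  simp [renderF]

lemma renderF_cons_true (b : List String) (ss : List Seg) (out : List String) (pf : Bool) :
    renderF (.foot b true :: ss) out pf = render ss ((out ++ fmap b) ++ [""]) true := by
  simp [renderF, List.append_assoc]

lemma renderG_cons_none (f : String) (b : List String) (ss : List Seg) (out : List String) (pf : Bool) :
    renderG (.page f b none :: ss) out pf = render ss (out ++ pfilter b) pf := by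
  simp [renderG]

lemma renderG_cons_some (f : String) (b : List String) (c : String) (ss : List Seg) (out : List String) (pf : Bool) :
    renderG (.page f b (some c) :: ss) out pf = render ss ((out ++ pfilter b) ++ [c]) false := by
  simp [renderG, List.append_assoc]

-- the head of parseAux is always a segment of the current mode
lemma parse_head (ls : List String) :
    (∀ acc, ∃ p ss, parseAux ls (.plain acc) = .plain p :: ss)
    ∧ (∀ b, ∃ body c ss, parseAux ls (.foot b) = .foot body c :: ss)
    ∧ (∀ f b, ∃ body c ss, parseAux ls (.page f b) = .page f body c :: ss) := by
  induction ls with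
  | nil =>
    exact ⟨fun acc => ⟨acc, _, rfl⟩, fun b => ⟨b, false, _, rfl⟩, fun f b => ⟨b, none, _, rfl⟩⟩
  | cons l rest ih =>
    obtain ⟨ihp, ihf, ihg⟩ := ih
    refine ⟨fun acc => ?_, fun b => ?_, fun f b => ?_⟩
    · by_cases hf : (PySem.Str.strip l == "```footnote") = true
      · exact ⟨acc, _, by rw [parse_fence_foot l rest _ hf]; rfl⟩
      · by_cases hp : (PySem.Str.strip l == "```page") = true
        · exact ⟨acc, _, by rw [parse_fence_page l rest _ hf hp]; rfl⟩
        · obtain ⟨p, ss, he⟩ := ihp (acc ++ [l])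
          exact ⟨p, ss, by rw [parse_plain l rest acc hf hp]; exact he⟩
    · by_cases hf : (PySem.Str.strip l == "```footnote") = true
      · exact ⟨b, false, _, by rw [parse_fence_foot l rest _ hf]; rfl⟩
      · by_cases hp : (PySem.Str.strip l == "```page") = true
        · exact ⟨b, false, _, by rw [parse_fence_page l rest _ hf hp]; rfl⟩
        · by_cases hc : (PySem.Str.strip l == "```") = true
          · exact ⟨b, true, _, by rw [parse_foot_close l rest b hf hp hc]⟩
          · obtain ⟨body, c, ss, he⟩ := ihf (b ++ [l])
            exact ⟨body, c, ss, by rw [parse_foot_body l rest b hf hp hc]; exact he⟩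
    · by_cases hf : (PySem.Str.strip l == "```footnote") = true
      · exact ⟨b, none, _, by rw [parse_fence_foot l rest _ hf]; rfl⟩
      · by_cases hp : (PySem.Str.strip l == "```page") = true
        · exact ⟨b, none, _, by rw [parse_fence_page l rest _ hf hp]; rfl⟩
        · by_cases hc : (PySem.Str.strip l == "```") = true
          · exact ⟨b, some l, _, by rw [parse_page_close l rest f b hf hp hc]⟩
          · obtain ⟨body, c, ss, he⟩ := ihg f (b ++ [l])
            exact ⟨body, c, ss, by rw [parse_page_body l rest f b hf hp hc]; exact he⟩

-- bridge: rendering a footnote/page segment = emitting its opening, then the continuation renderer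
lemma br_foot (body : List String) (c : Bool) (ss : List Seg) (out : List String) (pf : Bool) :
    render (.foot body c :: ss) out pf
    = renderF (.foot body c :: ss)
        ((if pf && (match out.getLast? with
                    | some x => PySem.Str.strip x != ""
                    | none => false) then out ++ [""] else out) ++ ["> ---", ">"]) pf := by
  cases c <;> simp [render, renderF, List.append_assoc]

lemma br_page (f : String) (body : List String) (cl : Option String) (ss : List Seg) (out : List String) (pf : Bool) :
    render (.page f body cl :: ss) out pf = renderG (.page f body cl :: ss) (out ++ [f]) pf := by
  cases cl <;> simp [render, renderG, List.append_assoc]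

-- the main invariant: A's loop state = B's (parse; render) in each of the three modes
lemma main_inv (ls : List String) :
    ∀ out pf,
      (∀ acc, aLoop ls (out ++ acc) false none pf = render (parseAux ls (.plain acc)) out pf)
      ∧ (∀ b, aLoop ls (out ++ fmap b) true (some .footnote) pf = renderF (parseAux ls (.foot b)) out pf)
      ∧ (∀ f b, aLoop ls (out ++ pfilter b) true (some .page) pf = renderG (parseAux ls (.page f b)) out pf) := by
  induction ls with
  | nil =>
    intro out pf
    refine ⟨fun acc => ?_, fun b => ?_, fun f b => ?_⟩ <;>
      simp [aLoop, parseAux, finishSeg, render, renderF, renderG]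
  | cons l rest ih =>
    intro out pf
    refine ⟨fun acc => ?_, fun b => ?_, fun f b => ?_⟩
    · by_cases hf : (PySem.Str.strip l == "```footnote") = true
      · obtain ⟨body, c, ss, he⟩ := (parse_head rest).2.1 []
        rw [aLoop_foot_fence l rest (out ++ acc) pf hf false none,
            parse_fence_foot l rest (.plain acc) hf]
        simp only [finishSeg]
        rw [render_plain_cons, he, br_foot, ← he]
        have hih := (ih ((if pf && (match (out ++ acc).getLast? with
            | some x => PySem.Str.strip x != ""
            | none => false) then (out ++ acc) ++ [""] else (out ++ acc)) ++ ["> ---", ">"]) pf).2.1 []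
        rw [fmap_nil, List.append_nil] at hih
        exact hih
      · by_cases hp : (PySem.Str.strip l == "```page") = true
        · obtain ⟨body, c, ss, he⟩ := (parse_head rest).2.2 l []
          rw [aLoop_page_fence l rest (out ++ acc) pf hf hp false none,
              parse_fence_page l rest (.plain acc) hf hp]
          simp only [finishSeg]
          rw [render_plain_cons, he, br_page, ← he]
          have hih := (ih ((out ++ acc) ++ [l]) pf).2.2 l []
          rw [pfilter_nil, List.append_nil] at hih
          exact hih
        · rw [aLoop_plain l rest (out ++ acc) pf hf hp, parse_plain l rest acc hf hp]
          have hih := (ih out pf).1 (acc ++ [l])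
          rw [← List.append_assoc] at hih
          exact hih
    · by_cases hf : (PySem.Str.strip l == "```footnote") = true
      · obtain ⟨body, c, ss, he⟩ := (parse_head rest).2.1 []
        rw [aLoop_foot_fence l rest (out ++ fmap b) pf hf true (some .footnote),
            parse_fence_foot l rest (.foot b) hf]
        simp only [finishSeg]
        rw [renderF_cons_false, he, br_foot, ← he]
        have hih := (ih ((if pf && (match (out ++ fmap b).getLast? with
            | some x => PySem.Str.strip x != ""
            | none => false) then (out ++ fmap b) ++ [""] else (out ++ fmap b)) ++ ["> ---", ">"]) pf).2.1 []
        rw [fmap_nil, List.append_nil] at hih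
        exact hih
      · by_cases hp : (PySem.Str.strip l == "```page") = true
        · obtain ⟨body, c, ss, he⟩ := (parse_head rest).2.2 l []
          rw [aLoop_page_fence l rest (out ++ fmap b) pf hf hp true (some .footnote),
              parse_fence_page l rest (.foot b) hf hp]
          simp only [finishSeg]
          rw [renderF_cons_false, he, br_page, ← he]
          have hih := (ih ((out ++ fmap b) ++ [l]) pf).2.2 l []
          rw [pfilter_nil, List.append_nil] at hih
          exact hih
        · by_cases hc : (PySem.Str.strip l == "```") = true
          · rw [aLoop_close_foot l rest (out ++ fmap b) pf hf hp hc,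
                parse_foot_close l rest b hf hp hc, renderF_cons_true]
            have hih := (ih ((out ++ fmap b) ++ [""]) true).1 []
            rw [List.append_nil] at hih
            exact hih
          · rw [aLoop_body_foot l rest (out ++ fmap b) pf hf hp hc,
                parse_foot_body l rest b hf hp hc]
            have hih := (ih out pf).2.1 (b ++ [l])
            rw [fmap_append, ← List.append_assoc] at hih
            exact hih
    · by_cases hf : (PySem.Str.strip l == "```footnote") = true
      · obtain ⟨body, c, ss, he⟩ := (parse_head rest).2.1 []
        rw [aLoop_foot_fence l rest (out ++ pfilter b) pf hf true (some .page),
            parse_fence_foot l rest (.page f b) hf]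
        simp only [finishSeg]
        rw [renderG_cons_none, he, br_foot, ← he]
        have hih := (ih ((if pf && (match (out ++ pfilter b).getLast? with
            | some x => PySem.Str.strip x != ""
            | none => false) then (out ++ pfilter b) ++ [""] else (out ++ pfilter b)) ++ ["> ---", ">"]) pf).2.1 []
        rw [fmap_nil, List.append_nil] at hih
        exact hih
      · by_cases hp : (PySem.Str.strip l == "```page") = true
        · obtain ⟨body, c, ss, he⟩ := (parse_head rest).2.2 l []
          rw [aLoop_page_fence l rest (out ++ pfilter b) pf hf hp true (some .page),
              parse_fence_page l rest (.page f b) hf hp]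
          simp only [finishSeg]
          rw [renderG_cons_none, he, br_page, ← he]
          have hih := (ih ((out ++ pfilter b) ++ [l]) pf).2.2 l []
          rw [pfilter_nil, List.append_nil] at hih
          exact hih
        · by_cases hc : (PySem.Str.strip l == "```") = true
          · rw [aLoop_close_page l rest (out ++ pfilter b) pf hf hp hc,
                parse_page_close l rest f b hf hp hc, renderG_cons_some]
            have hih := (ih ((out ++ pfilter b) ++ [l]) false).1 []
            rw [List.append_nil] at hih
            exact hih
          · rw [aLoop_body_page l rest (out ++ pfilter b) pf hf hp hc,
                parse_page_body l rest f b hf hp hc]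
            have hih := (ih out pf).2.2 f (b ++ [l])
            rw [pfilter_append, ← List.append_assoc] at hih
            exact hih

lemma trimN_le (out : List String) (n : Nat) : trimN out n ≤ n := by
  induction n with
  | zero => simp [trimN]
  | succ n ih => simp only [trimN]; split <;> omega

lemma trimN_append (out : List String) (l : String) (n : Nat) (h : n ≤ out.length) :
    trimN (out ++ [l]) n = trimN out n := by
  induction n with
  | zero => rfl
  | succ n ih =>
    simp only [trimN]
    rw [List.getD_append _ _ _ _ (by omega), ih (by omega)]

lemma trim_eq (out : List String) : trimA out = out.take (trimN out out.length) := by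
  induction out using List.reverseRecOn with
  | nil => simp [trimA, trimN]
  | append_singleton out l ih =>
    rw [trimA]
    simp only [List.getLast?_concat, List.dropLast_concat, List.length_append,
      List.length_cons, List.length_nil, Nat.zero_add, trimN]
    have hget : (out ++ [l]).getD out.length "" = l := by
      simp [List.getD_eq_getElem?_getD]
    rw [hget]
    by_cases hb : (PySem.Str.strip l == "") = true
    · rw [if_pos hb, if_pos hb, trimN_append out l out.length le_rfl,
          List.take_append_of_le_length (trimN_le out out.length)]
      exact ih
    · rw [if_neg hb, if_neg hb]
      rw [show out.length + 1 = (out ++ [l]).length by simp, List.take_length]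

-- ===== VERDICT (by name: the statement is the Claim_ definition above) =====
theorem convert_to_quote_format_spec : Claim_equal_convert_to_quote_format := by
  intro t _
  unfold Spec_convert_to_quote_format convert_to_quote_format convert_to_quote_format_alt
  have h := (main_inv ((PySem.Str.split? t "\n").getD []) [] false).1 []
  simp only [List.append_nil] at h
  rw [h, trim_eq]
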